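-- pv_equiv track=rewrite | github.com/Mohamedragih1/Many-Time-Pad-Cracker | main.py | crack_message
-- ===== SOURCE A (Python) =====
-- def crack_message(decimal_cipher, boolean_array, cracked_plain_text):
--     """
--     Cracks the cipher text by using the boolean array to detect positions of spaces and determining the
--     corresponding plain text characters.
--
--     Args:
--         decimal_cipher (list of list of int): A list of lists where each sublist contains decimal integers
--                                               representing cipher text.
--         boolean_array (list of list of bool): A list of lists indicating where spaces are likely to appear.
--         cracked_plain_text (list of list of str): A list of lists representing the partially cracked plain text.
--
--     Returns:
--         list of list of str: The updated plain text where detected characters are inserted at appropriate positions.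
--     """
--     for column in range(len(decimal_cipher[0])):
--         for fixed_line in range(8):
--             if boolean_array[fixed_line][column]:  # Check only if it's valid
--                 for variable_line in range(8):
--                     result = decimal_cipher[fixed_line][column] ^ decimal_cipher[variable_line][column] ^ 32
--                     if 32 <= result <= 126:  # Check if it's printable
--                         cracked_plain_text[variable_line][column] = chr(result)
--     return cracked_plain_text
-- ===== SOURCE B (Python) =====
-- def _crack_char(decimal_cipher, boolean_array, vl, col):
--     """First fixed_line from 7 down to 0 whose space flag is set and whose
--     XOR gives a printable character decides the cell; None if no line does."""
--     for fl in range(7, -1, -1):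
--         if boolean_array[fl][col]:
--             result = decimal_cipher[fl][col] ^ decimal_cipher[vl][col] ^ 32
--             if 32 <= result <= 126:
--                 return chr(result)
--     return None
--
-- def crack_message(decimal_cipher, boolean_array, cracked_plain_text):
--     n = len(decimal_cipher[0])
--     out = []
--     for vl, row in enumerate(cracked_plain_text):
--         if vl < 8:
--             new_row = []
--             for col, ch in enumerate(row):
--                 c = _crack_char(decimal_cipher, boolean_array, vl, col) if col < n else None
--                 new_row.append(ch if c is None else c)
--             out.append(new_row)
--         else:
--             out.append(row)
--     return out
-- ===== Notes on version B (the rewrite author's own statement) =====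
-- stated objective: alternative
-- what changed: Per-cell decisive scan: for each (row, column) B scans fixed_line from 7 down to 0 and writes the first printable hit once (last-forward-winner becomes first-backward-winner), building a fresh matrix, instead of A's triple loop that repeatedly overwrites cells in place.
import Mathlib
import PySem

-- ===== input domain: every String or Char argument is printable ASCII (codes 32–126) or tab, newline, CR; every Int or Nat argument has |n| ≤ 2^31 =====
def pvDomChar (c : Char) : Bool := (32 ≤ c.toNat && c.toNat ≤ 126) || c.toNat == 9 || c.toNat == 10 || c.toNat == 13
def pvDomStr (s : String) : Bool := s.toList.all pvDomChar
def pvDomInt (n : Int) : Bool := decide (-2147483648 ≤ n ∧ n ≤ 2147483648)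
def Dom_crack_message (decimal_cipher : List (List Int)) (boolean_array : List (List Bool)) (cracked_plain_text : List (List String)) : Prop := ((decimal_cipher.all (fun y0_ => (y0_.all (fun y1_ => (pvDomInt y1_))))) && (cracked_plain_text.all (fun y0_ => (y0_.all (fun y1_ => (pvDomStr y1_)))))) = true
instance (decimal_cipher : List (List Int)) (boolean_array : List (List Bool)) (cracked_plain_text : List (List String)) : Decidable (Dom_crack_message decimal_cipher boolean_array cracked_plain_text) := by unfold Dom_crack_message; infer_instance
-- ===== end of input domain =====

-- B replaces A's overwrite-in-place triple loop by a per-cell decisive scan (fixed_line 7 → 0,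
-- first printable hit wins) building a fresh matrix; equivalence is about the RETURN value only
-- (Python A mutates cracked_plain_text in place, B does not).

-- shared atomic expressions both Pythons compute literally
def pvDcv (dc : List (List Int)) (i j : Nat) : Int := (dc.getD i []).getD j 0
def pvBval (ba : List (List Bool)) (i j : Nat) : Bool := (ba.getD i []).getD j false
def pvRes (dc : List (List Int)) (fl vl col : Nat) : Int :=
  PySem.Int.bxor (PySem.Int.bxor (pvDcv dc fl col) (pvDcv dc vl col)) 32
def pvChr (r : Int) : String := String.ofList [Char.ofNat r.toNat]

-- ===== PORT A =====
-- cracked_plain_text[vl][col] = v  (in-bounds list assignment; Pre_ guarantees in range)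
def pvWriteCell (m : List (List String)) (vl col : Nat) (v : String) : List (List String) :=
  m.set vl ((m.getD vl []).set col v)

-- body of A's innermost 'for variable_line in range(8)' loop
def pvStepVl (dc : List (List Int)) (fl col : Nat) (m : List (List String)) (vl : Nat) : List (List String) :=
  if 32 ≤ pvRes dc fl vl col ∧ pvRes dc fl vl col ≤ 126 then
    pvWriteCell m vl col (pvChr (pvRes dc fl vl col))
  else m

-- body of A's 'for fixed_line in range(8)' loop
def pvStepFl (dc : List (List Int)) (ba : List (List Bool)) (col : Nat)
    (m : List (List String)) (fl : Nat) : List (List String) :=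
  if pvBval ba fl col then (List.range 8).foldl (pvStepVl dc fl col) m else m

-- body of A's 'for column in range(len(decimal_cipher[0]))' loop
def pvStepCol (dc : List (List Int)) (ba : List (List Bool))
    (m : List (List String)) (col : Nat) : List (List String) :=
  (List.range 8).foldl (pvStepFl dc ba col) m

def crack_message (decimal_cipher : List (List Int)) (boolean_array : List (List Bool)) (cracked_plain_text : List (List String)) : List (List String) :=
  (List.range (decimal_cipher.headD []).length).foldl
    (pvStepCol decimal_cipher boolean_array) cracked_plain_text

-- ===== PORT B =====
-- B's _crack_char: scan the given fixed_line list (called with [7,…,0]); first flagged,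
-- printable hit returns its character, else None
def pvCrackChar (dc : List (List Int)) (ba : List (List Bool)) (vl col : Nat) :
    List Nat → Option String
  | [] => none
  | fl :: rest =>
    if pvBval ba fl col then
      if 32 ≤ pvRes dc fl vl col ∧ pvRes dc fl vl col ≤ 126 then some (pvChr (pvRes dc fl vl col))
      else pvCrackChar dc ba vl col rest
    else pvCrackChar dc ba vl col rest

-- range(7, -1, -1)
def pvDesc8 : List Nat := [7, 6, 5, 4, 3, 2, 1, 0]

def crack_message_alt (decimal_cipher : List (List Int)) (boolean_array : List (List Bool)) (cracked_plain_text : List (List String)) : List (List String) :=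
  let n := (decimal_cipher.headD []).length
  cracked_plain_text.zipIdx.map (fun rv =>
    if rv.2 < 8 then
      rv.1.zipIdx.map (fun cc =>
        if cc.2 < n then
          (pvCrackChar decimal_cipher boolean_array rv.2 cc.2 pvDesc8).getD cc.1
        else cc.1)
    else rv.1)

-- ===== PRECONDITION & SPEC =====
-- Pre_ = decimal_cipher nonempty (A always reads decimal_cipher[0]) and, when there is at
-- least one column, the shape A's unconditional loop bounds assume (8 full-width rows in each
-- matrix; outside it Python A raises IndexError). It also excludes degenerate inputs where a
-- too-short row is never actually indexed because no space flag fires, on which A returns the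
-- input unchanged — as does B.
def Pre_crack_message (decimal_cipher : List (List Int)) (boolean_array : List (List Bool)) (cracked_plain_text : List (List String)) : Prop :=
  decimal_cipher ≠ [] ∧
  ((decimal_cipher.headD []).length = 0 ∨
    (8 ≤ decimal_cipher.length ∧ 8 ≤ boolean_array.length ∧ 8 ≤ cracked_plain_text.length ∧
     ∀ i < 8, (decimal_cipher.headD []).length ≤ (decimal_cipher.getD i []).length ∧
              (decimal_cipher.headD []).length ≤ (boolean_array.getD i []).length ∧
              (decimal_cipher.headD []).length ≤ (cracked_plain_text.getD i []).length))
instance (decimal_cipher : List (List Int)) (boolean_array : List (List Bool)) (cracked_plain_text : List (List String)) : Decidable (Pre_crack_message decimal_cipher boolean_array cracked_plain_text) := by unfold Pre_crack_message; infer_instance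

def pvWitness_crack_message : List (List Int) × List (List Bool) × List (List String) :=
  ([[65], [66], [67], [68], [69], [70], [71], [72]],
   [[true], [false], [false], [false], [false], [false], [false], [false]],
   [["?"], ["?"], ["?"], ["?"], ["?"], ["?"], ["?"], ["?"]])

def Spec_crack_message (decimal_cipher : List (List Int)) (boolean_array : List (List Bool)) (cracked_plain_text : List (List String)) (out : List (List String)) : Prop := out = crack_message_alt decimal_cipher boolean_array cracked_plain_text
instance (decimal_cipher : List (List Int)) (boolean_array : List (List Bool)) (cracked_plain_text : List (List String)) (out : List (List String)) : Decidable (Spec_crack_message decimal_cipher boolean_array cracked_plain_text out) := by unfold Spec_crack_message; infer_instance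

-- ===== CLAIM (what is proved, stated in full; the proofs are below) =====
def Claim_equal_crack_message : Prop := ∀ (decimal_cipher : List (List Int)) (boolean_array : List (List Bool)) (cracked_plain_text : List (List String)), Dom_crack_message decimal_cipher boolean_array cracked_plain_text → Pre_crack_message decimal_cipher boolean_array cracked_plain_text → Spec_crack_message decimal_cipher boolean_array cracked_plain_text (crack_message decimal_cipher boolean_array cracked_plain_text)

-- ===== LEMMAS AND PROOFS =====

-- the value of cell (i, j) of a matrix (default "" out of range)
def pvEntry (m : List (List String)) (i j : Nat) : String := (m.getD i []).getD j ""

theorem pvWriteCell_length (m : List (List String)) (vl col : Nat) (v : String) :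
    (pvWriteCell m vl col v).length = m.length := by
  simp [pvWriteCell]

theorem pvWriteCell_rowlen (m : List (List String)) (vl col : Nat) (v : String) (i : Nat) :
    ((pvWriteCell m vl col v).getD i []).length = (m.getD i []).length := by
  unfold pvWriteCell
  rcases Nat.lt_or_ge vl m.length with h | h
  · by_cases hi : i = vl
    · subst hi
      simp [List.getD, h]
    · simp [List.getD, Ne.symm hi]
  · rw [List.set_eq_of_length_le (by simpa using h)]

theorem pvWriteCell_entry (m : List (List String)) (vl col : Nat) (v : String) (i j : Nat) :
    pvEntry (pvWriteCell m vl col v) i j =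
      if i = vl ∧ j = col ∧ vl < m.length ∧ col < (m.getD vl []).length then v
      else pvEntry m i j := by
  simp only [pvEntry, pvWriteCell, List.getD, List.getElem?_set]
  by_cases h1 : vl = i
  · subst h1
    by_cases h2 : vl < m.length
    · simp only [if_pos trivial, if_pos h2, Option.getD_some, List.getElem?_set]
      by_cases h3 : col = j
      · subst h3
        by_cases h4 : col < (m[vl]?.getD []).length
        · simp only [List.getElem?_eq_getElem h2, Option.getD_some] at h4 ⊢
          simp [h2, h4]
        · simp only [if_pos trivial, if_neg h4]
          rw [if_neg (by intro hh; exact h4 hh.2.2.2),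
              List.getElem?_eq_none (show (m[vl]?.getD []).length ≤ col by omega)]
      · rw [if_neg h3, if_neg (by intro hh; exact h3 hh.2.1.symm)]
    · simp only [if_pos trivial, if_neg h2, Option.getD_none]
      rw [if_neg (by intro hh; exact h2 hh.2.2.1), List.getElem?_eq_none (show m.length ≤ vl by omega)]
      rfl
  · rw [if_neg h1, if_neg (by intro hh; exact h1 hh.1.symm)]

theorem pvVlFold_length (dc : List (List Int)) (fl col : Nat) (m : List (List String)) (l : List Nat) :
    (l.foldl (pvStepVl dc fl col) m).length = m.length := by
  induction l generalizing m with
  | nil => rfl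
  | cons a l ih =>
      simp only [List.foldl_cons]
      rw [ih]
      unfold pvStepVl
      split <;> simp [pvWriteCell_length]

theorem pvVlFold_rowlen (dc : List (List Int)) (fl col : Nat) (m : List (List String)) (l : List Nat) (i : Nat) :
    ((l.foldl (pvStepVl dc fl col) m).getD i []).length = (m.getD i []).length := by
  induction l generalizing m with
  | nil => rfl
  | cons a l ih =>
      simp only [List.foldl_cons]
      rw [ih]
      unfold pvStepVl
      split
      · exact pvWriteCell_rowlen m a col _ i
      · rfl

theorem pvVlFold_entry (dc : List (List Int)) (fl col : Nat) (k : Nat) (m : List (List String)) (i j : Nat) :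
    pvEntry ((List.range k).foldl (pvStepVl dc fl col) m) i j =
      if i < k ∧ j = col ∧ i < m.length ∧ col < (m.getD i []).length ∧
          32 ≤ pvRes dc fl i col ∧ pvRes dc fl i col ≤ 126 then pvChr (pvRes dc fl i col)
      else pvEntry m i j := by
  induction k with
  | zero => simp
  | succ k ih =>
    rw [List.range_succ, List.foldl_append, List.foldl_cons, List.foldl_nil]
    have hl := pvVlFold_length dc fl col m (List.range k)
    have hrk := pvVlFold_rowlen dc fl col m (List.range k) k
    rw [show ∀ (M : List (List String)), pvStepVl dc fl col M k =
        if 32 ≤ pvRes dc fl k col ∧ pvRes dc fl k col ≤ 126 then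
          pvWriteCell M k col (pvChr (pvRes dc fl k col)) else M from fun _ => rfl]
    by_cases hp : 32 ≤ pvRes dc fl k col ∧ pvRes dc fl k col ≤ 126
    · rw [if_pos hp, pvWriteCell_entry, ih, hl, hrk]
      by_cases hik : i = k
      · subst hik
        split_ifs <;> first | rfl | omega
      · split_ifs <;> first | rfl | omega
    · rw [if_neg hp, ih]
      by_cases hik : i = k
      · subst hik
        split_ifs <;> first | rfl | omega
      · split_ifs <;> first | rfl | omega

theorem pvFlFold_length (dc : List (List Int)) (ba : List (List Bool)) (col : Nat)
    (m : List (List String)) (l : List Nat) :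
    (l.foldl (pvStepFl dc ba col) m).length = m.length := by
  induction l generalizing m with
  | nil => rfl
  | cons a l ih =>
      simp only [List.foldl_cons]
      rw [ih]
      unfold pvStepFl
      split <;> simp [pvVlFold_length]

theorem pvFlFold_rowlen (dc : List (List Int)) (ba : List (List Bool)) (col : Nat)
    (m : List (List String)) (l : List Nat) (i : Nat) :
    ((l.foldl (pvStepFl dc ba col) m).getD i []).length = (m.getD i []).length := by
  induction l generalizing m with
  | nil => rfl
  | cons a l ih =>
      simp only [List.foldl_cons]
      rw [ih]
      unfold pvStepFl
      split
      · exact pvVlFold_rowlen dc a col m (List.range 8) i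
      · rfl

theorem pvFlFold_entry (dc : List (List Int)) (ba : List (List Bool)) (col : Nat)
    (fls : List Nat) (m : List (List String)) (i j : Nat) :
    pvEntry (fls.foldl (pvStepFl dc ba col) m) i j =
      if i < 8 ∧ j = col ∧ i < m.length ∧ col < (m.getD i []).length then
        (pvCrackChar dc ba i col fls.reverse).getD (pvEntry m i j)
      else pvEntry m i j := by
  induction fls using List.reverseRecOn with
  | nil => simp [pvCrackChar]
  | append_singleton as fl ih =>
    rw [List.foldl_append, List.foldl_cons, List.foldl_nil, List.reverse_append,
        List.reverse_singleton, List.singleton_append]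
    have hl := pvFlFold_length dc ba col m as
    have hri := pvFlFold_rowlen dc ba col m as i
    rw [show ∀ (M : List (List String)), pvStepFl dc ba col M fl =
        if pvBval ba fl col then (List.range 8).foldl (pvStepVl dc fl col) M else M from fun _ => rfl]
    simp only [pvCrackChar]
    by_cases hb : pvBval ba fl col = true
    · rw [if_pos hb, if_pos hb, pvVlFold_entry, ih, hl, hri]
      by_cases hp : 32 ≤ pvRes dc fl i col ∧ pvRes dc fl i col ≤ 126
      · rw [if_pos hp]
        split_ifs <;> first | rfl | omega
      · rw [if_neg hp]
        split_ifs <;> first | rfl | omega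
    · rw [if_neg hb, if_neg hb, ih]

theorem pvColFold_length (dc : List (List Int)) (ba : List (List Bool))
    (m : List (List String)) (l : List Nat) :
    (l.foldl (pvStepCol dc ba) m).length = m.length := by
  induction l generalizing m with
  | nil => rfl
  | cons a l ih =>
      simp only [List.foldl_cons]
      rw [ih]
      simp [pvStepCol, pvFlFold_length]

theorem pvColFold_rowlen (dc : List (List Int)) (ba : List (List Bool))
    (m : List (List String)) (l : List Nat) (i : Nat) :
    ((l.foldl (pvStepCol dc ba) m).getD i []).length = (m.getD i []).length := by
  induction l generalizing m with
  | nil => rfl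
  | cons a l ih =>
      simp only [List.foldl_cons]
      rw [ih]
      exact pvFlFold_rowlen dc ba a m (List.range 8) i

theorem pvColFold_entry (dc : List (List Int)) (ba : List (List Bool)) (k : Nat)
    (m : List (List String)) (i j : Nat) :
    pvEntry ((List.range k).foldl (pvStepCol dc ba) m) i j =
      if j < k ∧ i < 8 ∧ i < m.length ∧ j < (m.getD i []).length then
        (pvCrackChar dc ba i j pvDesc8).getD (pvEntry m i j)
      else pvEntry m i j := by
  induction k with
  | zero => simp
  | succ k ih =>
    rw [List.range_succ, List.foldl_append, List.foldl_cons, List.foldl_nil]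
    have hl := pvColFold_length dc ba m (List.range k)
    have hri := pvColFold_rowlen dc ba m (List.range k) i
    rw [show ∀ (M : List (List String)), pvStepCol dc ba M k =
        (List.range 8).foldl (pvStepFl dc ba k) M from fun _ => rfl]
    rw [pvFlFold_entry, hl, hri, ih]
    rw [show (List.range 8).reverse = pvDesc8 by decide]
    by_cases hjk : j = k
    · subst hjk
      split_ifs <;> first | rfl | omega
    · split_ifs <;> first | rfl | omega

-- ===== VERDICT (by name: the statement is the Claim_ definition above) =====
theorem crack_message_spec : Claim_equal_crack_message := by
  unfold Claim_equal_crack_message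
  intro dc ba cpt _ _
  unfold Spec_crack_message crack_message crack_message_alt
  have hlen := pvColFold_length dc ba cpt (List.range (dc.headD []).length)
  apply List.ext_getElem
  · simp only [List.length_map, List.length_zipIdx]
    exact hlen
  · intro i h1 h2
    have hic : i < cpt.length := by rwa [hlen] at h1
    have hrow : ((List.range (dc.headD []).length).foldl (pvStepCol dc ba) cpt)[i] =
        ((List.range (dc.headD []).length).foldl (pvStepCol dc ba) cpt).getD i [] :=
      (List.getD_eq_getElem _ [] h1).symm
    have hrl := pvColFold_rowlen dc ba cpt (List.range (dc.headD []).length) i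
    simp only [List.getElem_map, List.getElem_zipIdx, Nat.zero_add]
    by_cases h8 : i < 8
    · rw [if_pos h8]
      apply List.ext_getElem
      · rw [hrow, hrl]
        simp [List.getD, List.getElem?_eq_getElem hic]
      · intro j hj1 hj2
        have hjc : j < (cpt.getD i []).length := by rw [hrow, hrl] at hj1; exact hj1
        have hjc' : j < cpt[i].length := by
          simpa [List.getD, List.getElem?_eq_getElem hic] using hjc
        have hval : pvEntry ((List.range (dc.headD []).length).foldl (pvStepCol dc ba) cpt) i j
            = ((List.range (dc.headD []).length).foldl (pvStepCol dc ba) cpt)[i][j] := by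
          simp only [pvEntry, List.getD, List.getElem?_eq_getElem h1, Option.getD_some,
            List.getElem?_eq_getElem hj1]
        have hcpt : pvEntry cpt i j = cpt[i][j] := by
          simp only [pvEntry, List.getD, List.getElem?_eq_getElem hic, Option.getD_some,
            List.getElem?_eq_getElem hjc']
        rw [← hval, pvColFold_entry, hcpt]
        simp only [List.getElem_map, List.getElem_zipIdx, Nat.zero_add]
        by_cases hn : j < (dc.headD []).length
        · rw [if_pos hn, if_pos ⟨hn, h8, hic, hjc⟩]
        · rw [if_neg hn, if_neg (by intro hh; exact hn hh.1)]
    · rw [if_neg h8]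
      apply List.ext_getElem
      · rw [hrow, hrl]
        simp [List.getD, List.getElem?_eq_getElem hic]
      · intro j hj1 hj2
        have hjc : j < (cpt.getD i []).length := by rw [hrow, hrl] at hj1; exact hj1
        have hjc' : j < cpt[i].length := by
          simpa [List.getD, List.getElem?_eq_getElem hic] using hjc
        have hval : pvEntry ((List.range (dc.headD []).length).foldl (pvStepCol dc ba) cpt) i j
            = ((List.range (dc.headD []).length).foldl (pvStepCol dc ba) cpt)[i][j] := by
          simp only [pvEntry, List.getD, List.getElem?_eq_getElem h1, Option.getD_some,
            List.getElem?_eq_getElem hj1]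
        have hcpt : pvEntry cpt i j = cpt[i][j] := by
          simp only [pvEntry, List.getD, List.getElem?_eq_getElem hic, Option.getD_some,
            List.getElem?_eq_getElem hjc']
        rw [← hval, pvColFold_entry, hcpt]
        rw [if_neg (by intro hh; exact h8 hh.2.1)]
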